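-- pv_equiv track=rewrite | github.com/mariootamoaye/Form-Flow-AI | form-flow-backend/services/ai/smart_autofill.py | format_phone_by_country
-- ===== SOURCE A (Python) =====
-- def format_phone_by_country(phone: str, country: str = "US") -> str:
--     """Format phone number based on country."""
--     # Remove non-digits
--     digits = ''.join(c for c in phone if c.isdigit())
--
--     if country.upper() == "US":
--         if len(digits) == 10:
--             return f"({digits[:3]}) {digits[3:6]}-{digits[6:]}"
--         elif len(digits) == 11 and digits[0] == '1':
--             return f"+1 ({digits[1:4]}) {digits[4:7]}-{digits[7:]}"
--
--     elif country.upper() == "IN":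
--         if len(digits) == 10:
--             return f"+91 {digits[:5]} {digits[5:]}"
--
--     elif country.upper() == "UK":
--         if len(digits) == 10:
--             return f"+44 {digits[:4]} {digits[4:]}"
--
--     return digits
-- ===== SOURCE B (Python) =====
-- # Mask-filling reformulation: pick a template string per (country, digit count),
-- # then fill its '#' slots from the digit stream one character at a time.
-- _MASKS = {
--     ("US", 10): ("", "(###) ###-####"),
--     ("US", 11): ("1", "+1 (###) ###-####"),
--     ("IN", 10): ("", "+91 ##### #####"),
--     ("UK", 10): ("", "+44 #### ######"),
-- }
--
-- def format_phone_by_country(phone: str, country: str = "US") -> str: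
--     digits = ''.join(c for c in phone if c.isdigit())
--     rule = _MASKS.get((country.upper(), len(digits)))
--     if rule is None:
--         return digits
--     prefix, mask = rule
--     if not digits.startswith(prefix):
--         return digits
--     it = iter(digits[len(prefix):])
--     return ''.join(next(it) if ch == '#' else ch for ch in mask)
-- ===== Notes on version B (the rewrite author's own statement) =====
-- stated objective: alternative
-- what changed: Replaced the per-country if/elif chain of f-string slicings with a template table keyed by (country, digit count): the output is built by streaming the digits into the '#' slots of one mask string, with the US 11-digit case expressed as a required '1' prefix.
import Mathlib
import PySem

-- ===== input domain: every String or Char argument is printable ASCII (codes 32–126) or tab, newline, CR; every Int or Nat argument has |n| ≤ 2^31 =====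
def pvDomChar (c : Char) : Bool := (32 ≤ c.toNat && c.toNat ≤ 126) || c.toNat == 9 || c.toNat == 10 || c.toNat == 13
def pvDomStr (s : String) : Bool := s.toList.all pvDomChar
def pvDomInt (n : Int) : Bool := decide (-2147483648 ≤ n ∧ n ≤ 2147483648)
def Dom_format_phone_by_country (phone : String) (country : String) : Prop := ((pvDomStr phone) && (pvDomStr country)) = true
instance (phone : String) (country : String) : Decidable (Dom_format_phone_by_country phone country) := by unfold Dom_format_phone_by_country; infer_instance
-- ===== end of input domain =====

-- B builds the result by streaming the digits into the '#' slots of a per-(country, digit-count)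
-- template string, instead of A's per-country if/elif chain of f-string slicings (objective: alternative).

-- shared first line of both Pythons: digits = ''.join(c for c in phone if c.isdigit())
def pvDigits (phone : String) : List Char := phone.toList.filter PySem.Chars.isdigit

-- ===== PORT A =====
def format_phone_by_country (phone : String) (country : String) : String :=
  let digits : List Char := pvDigits phone
  if PySem.Str.upper country = "US" then
    if digits.length = 10 then
      String.ofList ("(".toList ++ PySem.List.slice digits none (some 3) ++ ") ".toList
        ++ PySem.List.slice digits (some 3) (some 6) ++ "-".toList
        ++ PySem.List.slice digits (some 6) none)
    else if digits.length = 11 ∧ PySem.List.pyGet? digits 0 = some '1' then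
      String.ofList ("+1 (".toList ++ PySem.List.slice digits (some 1) (some 4) ++ ") ".toList
        ++ PySem.List.slice digits (some 4) (some 7) ++ "-".toList
        ++ PySem.List.slice digits (some 7) none)
    else String.ofList digits
  else if PySem.Str.upper country = "IN" then
    if digits.length = 10 then
      String.ofList ("+91 ".toList ++ PySem.List.slice digits none (some 5) ++ " ".toList
        ++ PySem.List.slice digits (some 5) none)
    else String.ofList digits
  else if PySem.Str.upper country = "UK" then
    if digits.length = 10 then
      String.ofList ("+44 ".toList ++ PySem.List.slice digits none (some 4) ++ " ".toList
        ++ PySem.List.slice digits (some 4) none)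
    else String.ofList digits
  else String.ofList digits

-- ===== PORT B =====
-- the template table: (country, digit count) -> (required prefix, mask)
def pvMasks : PySem.Dict (String × Nat) (String × String) := PySem.Dict.ofList
  [ (("US", 10), ("", "(###) ###-####")),
    (("US", 11), ("1", "+1 (###) ###-####")),
    (("IN", 10), ("", "+91 ##### #####")),
    (("UK", 10), ("", "+44 #### ######")) ]

-- the mask-filling loop: each '#' consumes the next digit, other mask chars are copied.
-- (in Source B a '#' with no digit left would raise StopIteration; the table guarantees the
-- '#'-count equals the remaining digit count, so that branch is unreachable)
def pvFill : List Char → List Char → List Char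
  | _, [] => []
  | ds, c :: ms =>
      if c = '#' then
        match ds with
        | [] => pvFill [] ms
        | d :: rest => d :: pvFill rest ms
      else c :: pvFill ds ms

def format_phone_by_country_alt (phone : String) (country : String) : String :=
  let digits : List Char := pvDigits phone
  match pvMasks.get? (PySem.Str.upper country, digits.length) with
  | none => String.ofList digits
  | some (pre, mask) =>
      if pre.toList.isPrefixOf digits then
        String.ofList (pvFill (digits.drop pre.toList.length) mask.toList)
      else String.ofList digits

-- ===== PRECONDITION & SPEC =====
def Spec_format_phone_by_country (phone : String) (country : String) (out : String) : Prop := out = format_phone_by_country_alt phone country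
instance (phone : String) (country : String) (out : String) : Decidable (Spec_format_phone_by_country phone country out) := by unfold Spec_format_phone_by_country; infer_instance

-- ===== CLAIM (what is proved, stated in full; the proofs are below) =====
def Claim_equal_format_phone_by_country : Prop := ∀ (phone : String) (country : String), Dom_format_phone_by_country phone country → Spec_format_phone_by_country phone country (format_phone_by_country phone country)

-- ===== LEMMAS AND PROOFS =====
theorem pvDecomp (d : List Char) (n : Nat) (h : d.length = n + 1) :
    ∃ a t, d = a :: t ∧ t.length = n := by
  cases d with
  | nil => simp at h
  | cons a t => exact ⟨a, t, rfl, by simpa using h⟩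

theorem pv_items : pvMasks = PySem.Dict.mk
    [ (("US", 10), ("", "(###) ###-####")),
      (("US", 11), ("1", "+1 (###) ###-####")),
      (("IN", 10), ("", "+91 ##### #####")),
      (("UK", 10), ("", "+44 #### ######")) ] := rfl

theorem pv_masks_none (u : String) (n : Nat)
    (hUS : u ≠ "US") (hIN : u ≠ "IN") (hUK : u ≠ "UK") :
    pvMasks.get? (u, n) = none := by
  rw [pv_items]
  rw [PySem.Dict.get?_mk_cons, PySem.Dict.get?_mk_cons, PySem.Dict.get?_mk_cons, PySem.Dict.get?_mk_cons]
  simp [Ne.symm hUS, Ne.symm hIN, Ne.symm hUK, PySem.Dict.get?]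

theorem pv_masks_us (n : Nat) (h10 : n ≠ 10) (h11 : n ≠ 11) :
    pvMasks.get? ("US", n) = none := by
  rw [pv_items]
  rw [PySem.Dict.get?_mk_cons, PySem.Dict.get?_mk_cons, PySem.Dict.get?_mk_cons, PySem.Dict.get?_mk_cons]
  simp [Ne.symm h10, Ne.symm h11, PySem.Dict.get?]

theorem pv_masks_in (n : Nat) (h10 : n ≠ 10) :
    pvMasks.get? ("IN", n) = none := by
  rw [pv_items]
  rw [PySem.Dict.get?_mk_cons, PySem.Dict.get?_mk_cons, PySem.Dict.get?_mk_cons, PySem.Dict.get?_mk_cons]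
  simp [Ne.symm h10, PySem.Dict.get?]

theorem pv_masks_uk (n : Nat) (h10 : n ≠ 10) :
    pvMasks.get? ("UK", n) = none := by
  rw [pv_items]
  rw [PySem.Dict.get?_mk_cons, PySem.Dict.get?_mk_cons, PySem.Dict.get?_mk_cons, PySem.Dict.get?_mk_cons]
  simp [Ne.symm h10, PySem.Dict.get?]

set_option maxHeartbeats 4000000 in
theorem pv_main (phone country : String) :
    format_phone_by_country phone country = format_phone_by_country_alt phone country := by
  unfold format_phone_by_country format_phone_by_country_alt
  simp only []
  generalize pvDigits phone = d
  by_cases hUS : PySem.Str.upper country = "US"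
  · rw [hUS, if_pos rfl]
    by_cases h10 : d.length = 10
    · rw [if_pos h10]
      obtain ⟨a0, d, rfl, h⟩ := pvDecomp d 9 (by omega)
      obtain ⟨a1, d, rfl, h⟩ := pvDecomp d 8 (by omega)
      obtain ⟨a2, d, rfl, h⟩ := pvDecomp d 7 (by omega)
      obtain ⟨a3, d, rfl, h⟩ := pvDecomp d 6 (by omega)
      obtain ⟨a4, d, rfl, h⟩ := pvDecomp d 5 (by omega)
      obtain ⟨a5, d, rfl, h⟩ := pvDecomp d 4 (by omega)
      obtain ⟨a6, d, rfl, h⟩ := pvDecomp d 3 (by omega)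
      obtain ⟨a7, d, rfl, h⟩ := pvDecomp d 2 (by omega)
      obtain ⟨a8, d, rfl, h⟩ := pvDecomp d 1 (by omega)
      obtain ⟨a9, d, rfl, h⟩ := pvDecomp d 0 (by omega)
      obtain rfl : d = [] := by simpa using h
      rfl
    · rw [if_neg h10]
      by_cases h11 : d.length = 11
      · obtain ⟨a0, d, rfl, h⟩ := pvDecomp d 10 (by omega)
        obtain ⟨a1, d, rfl, h⟩ := pvDecomp d 9 (by omega)
        obtain ⟨a2, d, rfl, h⟩ := pvDecomp d 8 (by omega)
        obtain ⟨a3, d, rfl, h⟩ := pvDecomp d 7 (by omega)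
        obtain ⟨a4, d, rfl, h⟩ := pvDecomp d 6 (by omega)
        obtain ⟨a5, d, rfl, h⟩ := pvDecomp d 5 (by omega)
        obtain ⟨a6, d, rfl, h⟩ := pvDecomp d 4 (by omega)
        obtain ⟨a7, d, rfl, h⟩ := pvDecomp d 3 (by omega)
        obtain ⟨a8, d, rfl, h⟩ := pvDecomp d 2 (by omega)
        obtain ⟨a9, d, rfl, h⟩ := pvDecomp d 1 (by omega)
        obtain ⟨a10, d, rfl, h⟩ := pvDecomp d 0 (by omega)
        obtain rfl : d = [] := by simpa using h
        by_cases h1 : a0 = '1'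
        · subst h1
          rw [if_pos ⟨rfl, rfl⟩]
          rfl
        · rw [if_neg (fun hc => h1 (by simpa [PySem.List.pyGet?, PySem.List.pyIdx?] using hc.2))]
          show _ = if ('1' == a0 && List.isPrefixOf ([] : List Char) [a1,a2,a3,a4,a5,a6,a7,a8,a9,a10]) = true then _ else _
          simp [Ne.symm h1]
      · rw [if_neg (fun hc => h11 hc.1), pv_masks_us d.length h10 h11]
  · rw [if_neg hUS]
    by_cases hIN : PySem.Str.upper country = "IN"
    · rw [hIN, if_pos rfl]
      by_cases h10 : d.length = 10
      · rw [if_pos h10]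
        obtain ⟨a0, d, rfl, h⟩ := pvDecomp d 9 (by omega)
        obtain ⟨a1, d, rfl, h⟩ := pvDecomp d 8 (by omega)
        obtain ⟨a2, d, rfl, h⟩ := pvDecomp d 7 (by omega)
        obtain ⟨a3, d, rfl, h⟩ := pvDecomp d 6 (by omega)
        obtain ⟨a4, d, rfl, h⟩ := pvDecomp d 5 (by omega)
        obtain ⟨a5, d, rfl, h⟩ := pvDecomp d 4 (by omega)
        obtain ⟨a6, d, rfl, h⟩ := pvDecomp d 3 (by omega)
        obtain ⟨a7, d, rfl, h⟩ := pvDecomp d 2 (by omega)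
        obtain ⟨a8, d, rfl, h⟩ := pvDecomp d 1 (by omega)
        obtain ⟨a9, d, rfl, h⟩ := pvDecomp d 0 (by omega)
        obtain rfl : d = [] := by simpa using h
        rfl
      · rw [if_neg h10, pv_masks_in d.length h10]
    · rw [if_neg hIN]
      by_cases hUK : PySem.Str.upper country = "UK"
      · rw [hUK, if_pos rfl]
        by_cases h10 : d.length = 10
        · rw [if_pos h10]
          obtain ⟨a0, d, rfl, h⟩ := pvDecomp d 9 (by omega)
          obtain ⟨a1, d, rfl, h⟩ := pvDecomp d 8 (by omega)
          obtain ⟨a2, d, rfl, h⟩ := pvDecomp d 7 (by omega)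
          obtain ⟨a3, d, rfl, h⟩ := pvDecomp d 6 (by omega)
          obtain ⟨a4, d, rfl, h⟩ := pvDecomp d 5 (by omega)
          obtain ⟨a5, d, rfl, h⟩ := pvDecomp d 4 (by omega)
          obtain ⟨a6, d, rfl, h⟩ := pvDecomp d 3 (by omega)
          obtain ⟨a7, d, rfl, h⟩ := pvDecomp d 2 (by omega)
          obtain ⟨a8, d, rfl, h⟩ := pvDecomp d 1 (by omega)
          obtain ⟨a9, d, rfl, h⟩ := pvDecomp d 0 (by omega)
          obtain rfl : d = [] := by simpa using h
          rfl
        · rw [if_neg h10, pv_masks_uk d.length h10]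
      · rw [if_neg hUK, pv_masks_none _ _ hUS hIN hUK]

-- ===== VERDICT (by name: the statement is the Claim_ definition above) =====
theorem format_phone_by_country_spec : Claim_equal_format_phone_by_country :=
  fun phone country _ => pv_main phone country
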